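-- pv_equiv track=rewrite | github.com/wladickowalew/SmolenskSchedule | SmolenskParse.py | parse_rasp
-- ===== SOURCE A (Python) =====
-- def parse_rasp(tag_array):
-- 	answer = {}
-- 	counter = 0
-- 	current_string = tag_array[counter]
-- 	while not current_string.startswith('='):
-- 		counter += 1
-- 		current_string = tag_array[counter]
--
-- 	val_list = []
-- 	key = current_string.replace("=","").strip()
-- 	counter += 1
-- 	current_string = tag_array[counter]
-- 	while not current_string.startswith('='):
-- 		if current_string != "<br/>":
-- 			val_list.extend(current_string.split())
-- 		counter += 1
-- 		current_string = tag_array[counter]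
-- 	answer[key] = val_list
--
-- 	val_list = []
-- 	key = current_string.replace("=","").strip()
-- 	counter += 1
-- 	tag_array = tag_array[counter:]
-- 	for current_string in tag_array:
-- 		if current_string != "<br/>":
-- 			val_list.extend(current_string.split())
-- 	answer[key] = val_list
-- 	return answer
-- ===== SOURCE B (Python) =====
-- def parse_rasp(tag_array):
--     starts = [(i, s) for i, s in enumerate(tag_array) if s.startswith('=')]
--     (i, s1), (j, s2) = starts[0], starts[1]
--     key1 = s1.replace('=', '').strip()
--     key2 = s2.replace('=', '').strip()
--     val1 = [t for s in tag_array[i + 1:j] if s != '<br/>' for t in s.split()]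
--     val2 = [t for s in tag_array[j + 1:] if s != '<br/>' for t in s.split()]
--     return {key1: val1, key2: val2}
-- ===== Notes on version B (the rewrite author's own statement) =====
-- stated objective: simpler
-- what changed: Replaces A's counter-driven stateful while-loops over a shared index with an index-of-delimiters decomposition: enumerate/filter finds the two '=' markers once, then two slice-shaped comprehensions build the token lists.
import Mathlib
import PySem

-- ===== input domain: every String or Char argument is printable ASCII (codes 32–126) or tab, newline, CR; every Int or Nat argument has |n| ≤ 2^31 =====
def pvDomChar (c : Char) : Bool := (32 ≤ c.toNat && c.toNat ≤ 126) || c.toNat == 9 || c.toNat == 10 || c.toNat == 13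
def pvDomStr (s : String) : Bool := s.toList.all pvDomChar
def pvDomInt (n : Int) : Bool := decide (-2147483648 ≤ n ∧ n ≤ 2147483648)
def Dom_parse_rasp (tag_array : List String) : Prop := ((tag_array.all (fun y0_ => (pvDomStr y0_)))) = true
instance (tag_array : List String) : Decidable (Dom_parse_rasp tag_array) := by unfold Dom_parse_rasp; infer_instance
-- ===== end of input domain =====

-- B replaces A's counter-driven while-loops with an index-the-delimiters-first decomposition
-- (enumerate/filter, then two slices); same return value wherever A returns.


-- ===== PORT A =====
-- first while loop: advance counter until tag_array[counter] starts with '='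
def pvFindEqA : List String → Option (String × List String)
  | [] => none
  | s :: rest => if PySem.Str.startswith s "=" then some (s, rest) else pvFindEqA rest

-- second while loop: extend val_list (skipping "<br/>") until the next '='-starting string
def pvCollectA : List String → List String → Option (List String × String × List String)
  | _, [] => none
  | acc, s :: rest =>
      if PySem.Str.startswith s "=" then some (acc, s, rest)
      else pvCollectA (acc ++ (if s = "<br/>" then [] else PySem.Str.split₀ s)) rest

def parse_rasp (tag_array : List String) : List (String × List String) :=
  match pvFindEqA tag_array with
  | none => []          -- Python raises IndexError here (excluded by Pre_)
  | some (s1, r1) =>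
    let key1 := PySem.Str.strip (PySem.Str.replace s1 "=" "")
    match pvCollectA [] r1 with
    | none => []        -- Python raises IndexError here (excluded by Pre_)
    | some (val1, s2, r2) =>
      let key2 := PySem.Str.strip (PySem.Str.replace s2 "=" "")
      let val2 := r2.foldl (fun acc s => if s ≠ "<br/>" then acc ++ PySem.Str.split₀ s else acc) []
      (((PySem.Dict.empty : PySem.Dict String (List String)).insert key1 val1).insert key2 val2).items

-- ===== PORT B =====
-- [t for s in xs if s != '<br/>' for t in s.split()]
def pvTokensB (xs : List String) : List String :=
  (xs.filter (fun s => s ≠ "<br/>")).flatMap PySem.Str.split₀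

def parse_rasp_alt (tag_array : List String) : List (String × List String) :=
  let starts := (PySem.List.enumerate tag_array 0).filter (fun p => PySem.Str.startswith p.2 "=")
  match starts with
  | (i, s1) :: (j, s2) :: _ =>
    let key1 := PySem.Str.strip (PySem.Str.replace s1 "=" "")
    let key2 := PySem.Str.strip (PySem.Str.replace s2 "=" "")
    let val1 := pvTokensB (PySem.List.slice tag_array (some (i + 1)) (some j))
    let val2 := pvTokensB (PySem.List.slice tag_array (some (j + 1)) none)
    (((PySem.Dict.empty : PySem.Dict String (List String)).insert key1 val1).insert key2 val2).items
  | _ => []             -- Python raises IndexError here (excluded by Pre_)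

-- ===== PRECONDITION & SPEC =====
-- A (and B) raise IndexError when fewer than two entries start with '='; exactly those inputs are excluded.
def Pre_parse_rasp (tag_array : List String) : Prop :=
  2 ≤ (tag_array.filter (fun s => PySem.Str.startswith s "=")).length
instance (tag_array : List String) : Decidable (Pre_parse_rasp tag_array) := by
  unfold Pre_parse_rasp; infer_instance
def pvWitness_parse_rasp : List String := ["=a", "x y", "<br/>", "=b", "z"]

def Spec_parse_rasp (tag_array : List String) (out : List (String × List String)) : Prop := out = parse_rasp_alt tag_array
instance (tag_array : List String) (out : List (String × List String)) : Decidable (Spec_parse_rasp tag_array out) := by unfold Spec_parse_rasp; infer_instance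

-- ===== CLAIM (what is proved, stated in full; the proofs are below) =====
def Claim_equal_parse_rasp : Prop := ∀ (tag_array : List String), Dom_parse_rasp tag_array → Pre_parse_rasp tag_array → Spec_parse_rasp tag_array (parse_rasp tag_array)

-- ===== LEMMAS AND PROOFS =====

theorem pv_split1 {α : Type} (P : α → Bool) :
    ∀ (l : List α), 1 ≤ (l.filter P).length →
      ∃ mid s suf, l = mid ++ s :: suf ∧ (∀ x ∈ mid, ¬ P x) ∧ P s
  | [], h => by simp at h
  | a :: t, h => by
      by_cases hA : P a
      · exact ⟨[], a, t, by simp, by simp, hA⟩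
      · obtain ⟨mid, s, suf, h1, h2, h3⟩ :=
          pv_split1 P t (by simpa [List.filter_cons, hA] using h)
        exact ⟨a :: mid, s, suf, by simp [h1], by
          intro x hx
          rcases List.mem_cons.mp hx with rfl | hx
          · simpa using hA
          · exact h2 x hx, h3⟩

theorem pv_decomp (l : List String) (h : Pre_parse_rasp l) :
    ∃ pre s1 mid s2 suf,
      l = pre ++ s1 :: (mid ++ s2 :: suf) ∧
      (∀ x ∈ pre, ¬ PySem.Str.startswith x "=") ∧
      (∀ x ∈ mid, ¬ PySem.Str.startswith x "=") ∧
      PySem.Str.startswith s1 "=" ∧ PySem.Str.startswith s2 "=" := by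
  obtain ⟨pre, s1, rest, h1, h2, h3⟩ :=
    pv_split1 (fun s => PySem.Str.startswith s "=") l (by unfold Pre_parse_rasp at h; omega)
  have hp : pre.filter (fun s => PySem.Str.startswith s "=") = [] :=
    List.filter_eq_nil_iff.mpr (by intro x hx; simpa using h2 x hx)
  have hrest : 1 ≤ (rest.filter (fun s => PySem.Str.startswith s "=")).length := by
    unfold Pre_parse_rasp at h
    rw [h1, List.filter_append, hp, List.filter_cons, if_pos h3] at h
    simp only [List.nil_append, List.length_cons] at h
    omega
  obtain ⟨mid, s2, suf, g1, g2, g3⟩ :=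
    pv_split1 (fun s => PySem.Str.startswith s "=") rest hrest
  exact ⟨pre, s1, mid, s2, suf, by rw [h1, g1], h2, g2, h3, g3⟩

theorem pv_findEqA (pre : List String) (s1 : String) (r : List String)
    (hpre : ∀ x ∈ pre, ¬ PySem.Str.startswith x "=") (hs1 : PySem.Str.startswith s1 "=") :
    pvFindEqA (pre ++ s1 :: r) = some (s1, r) := by
  induction pre with
  | nil => simp only [List.nil_append, pvFindEqA]; rw [if_pos hs1]
  | cons a t ih =>
      simp only [List.cons_append, pvFindEqA]
      rw [if_neg (by simpa using hpre a (by simp)), ih (fun x hx => hpre x (by simp [hx]))]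

theorem pv_tokensB_cons (s : String) (xs : List String) :
    pvTokensB (s :: xs) = (if s = "<br/>" then [] else PySem.Str.split₀ s) ++ pvTokensB xs := by
  by_cases h : s = "<br/>" <;> simp [pvTokensB, h]

theorem pv_collectA (mid : List String) (s2 : String) (suf acc : List String)
    (hmid : ∀ x ∈ mid, ¬ PySem.Str.startswith x "=") (hs2 : PySem.Str.startswith s2 "=") :
    pvCollectA acc (mid ++ s2 :: suf) = some (acc ++ pvTokensB mid, s2, suf) := by
  induction mid generalizing acc with
  | nil => simp only [List.nil_append, pvCollectA]; rw [if_pos hs2]; simp [pvTokensB]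
  | cons a t ih =>
      simp only [List.cons_append, pvCollectA]
      rw [if_neg (by simpa using hmid a (by simp)),
          ih _ (fun x hx => hmid x (by simp [hx])), pv_tokensB_cons]
      simp

theorem pv_foldl_tokens (suf acc : List String) :
    suf.foldl (fun acc s => if s ≠ "<br/>" then acc ++ PySem.Str.split₀ s else acc) acc
      = acc ++ pvTokensB suf := by
  induction suf generalizing acc with
  | nil => simp [pvTokensB]
  | cons a t ih =>
      simp only [List.foldl_cons, ih, pv_tokensB_cons]
      by_cases h : a = "<br/>" <;> simp [h]

theorem pv_filter_enumerate_nil (xs : List String) (s : Int)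
    (h : ∀ x ∈ xs, ¬ PySem.Str.startswith x "=") :
    (PySem.List.enumerate xs s).filter (fun p => PySem.Str.startswith p.2 "=") = [] := by
  induction xs generalizing s with
  | nil => simp [PySem.List.enumerate_nil]
  | cons a t ih =>
      rw [PySem.List.enumerate_cons, List.filter_cons]
      rw [if_neg (by simpa using h a (by simp))]
      exact ih _ (fun x hx => h x (by simp [hx]))

-- ===== VERDICT (by name: the statement is the Claim_ definition above) =====
theorem parse_rasp_spec : Claim_equal_parse_rasp := by
  intro l _hdom hpre
  obtain ⟨pre, s1, mid, s2, suf, hl, hpre', hmid, hs1, hs2⟩ := pv_decomp l hpre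
  subst hl
  unfold Spec_parse_rasp parse_rasp parse_rasp_alt
  rw [pv_findEqA pre s1 _ hpre' hs1]
  dsimp only
  rw [pv_collectA mid s2 suf [] hmid hs2]
  dsimp only
  rw [pv_foldl_tokens]
  have hstarts : (PySem.List.enumerate (pre ++ s1 :: (mid ++ s2 :: suf)) 0).filter
      (fun p => PySem.Str.startswith p.2 "=")
      = ((pre.length : Int), s1) :: (((pre.length : Int) + 1 + (mid.length : Int)), s2) ::
        (PySem.List.enumerate suf ((pre.length : Int) + 1 + (mid.length : Int) + 1)).filter
          (fun p => PySem.Str.startswith p.2 "=") := by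
    rw [show pre ++ s1 :: (mid ++ s2 :: suf) = pre ++ ([s1] ++ (mid ++ ([s2] ++ suf))) by simp]
    rw [PySem.List.enumerate_append, PySem.List.enumerate_append, PySem.List.enumerate_append,
        List.filter_append, List.filter_append, List.filter_append,
        pv_filter_enumerate_nil _ _ hpre', pv_filter_enumerate_nil _ _ hmid]
    simp only [List.cons_append, List.nil_append, PySem.List.enumerate_cons,
      PySem.List.enumerate_nil, List.filter_cons, List.filter_nil, List.length_cons,
      List.length_nil]
    rw [if_pos (by simpa using hs1), if_pos (by simpa using hs2)]
    push_cast
    ring_nf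
    rw [List.singleton_append]
  rw [hstarts]
  dsimp only
  have e1 : pre ++ s1 :: (mid ++ s2 :: suf) = (pre ++ [s1]) ++ (mid ++ s2 :: suf) := by simp
  have e2 : pre ++ s1 :: (mid ++ s2 :: suf) = (pre ++ [s1] ++ mid ++ [s2]) ++ suf := by simp
  have hslice1 : PySem.List.slice (pre ++ s1 :: (mid ++ s2 :: suf))
      (some ((pre.length : Int) + 1)) (some ((pre.length : Int) + 1 + (mid.length : Int))) = mid := by
    rw [show ((pre.length : Int) + 1 + (mid.length : Int)) = (((pre.length + 1 + mid.length : Nat)) : Int) by push_cast; ring]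
    rw [show ((pre.length : Int) + 1) = (((pre.length + 1 : Nat)) : Int) by push_cast; ring]
    rw [PySem.List.slice_natCast, e1,
        List.drop_left' (by simp : (pre ++ [s1]).length = pre.length + 1),
        show pre.length + 1 + mid.length - (pre.length + 1) = mid.length by omega,
        List.take_left' rfl]
  have hslice2 : PySem.List.slice (pre ++ s1 :: (mid ++ s2 :: suf))
      (some ((pre.length : Int) + 1 + (mid.length : Int) + 1)) none = suf := by
    rw [show ((pre.length : Int) + 1 + (mid.length : Int) + 1) = (((pre.length + 1 + mid.length + 1 : Nat)) : Int) by push_cast; ring,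
        PySem.List.slice_from_natCast, e2,
        List.drop_left' (by simp; omega : (pre ++ [s1] ++ mid ++ [s2]).length = pre.length + 1 + mid.length + 1)]
  rw [hslice1, hslice2]
  simp
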